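-- pv_equiv track=rewrite | github.com/ofanan/APSR | MaxParal_v4.py | calc_P
-- ===== SOURCE A (Python) =====
-- def calc_P (a, b):
-- 	# Initialize P is a 2D-array of 1. P[a][b] will hold P(a,b)
-- 	# As the table starts from 0, it should be actually of size (a+1)*(b+1)
-- 	a = a+1
-- 	b = b+1
-- 	P = [x[:] for x in [[0] * (b+1)] * (a+1)]
-- 	for cur_b in range (0, b+1):
-- 		P[0][cur_b] = 1
-- 	for cur_a in range (0, a+1):
-- 		P[cur_a][1] = 1
-- 	for cur_b in range (2, b+1):
-- 		for cur_a in range (1, a+1):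
-- 			for j in range (0, cur_a+1):
-- 				P[cur_a][cur_b] += pow (cur_b, j) * P[cur_a-j][cur_b-1]
-- 	return P
-- ===== SOURCE B (Python) =====
-- def calc_P(a, b):
-- 	# Row-by-row fill using the first-order recurrence
-- 	# P(ca, cb) = cb * P(ca-1, cb) + P(ca, cb-1), which is the original
-- 	# weighted-convolution recurrence with the inner sum unrolled.
-- 	cols = b + 2
-- 	P = []
-- 	for ca in range(a + 2):
-- 		if ca == 0:
-- 			row = [1] * cols
-- 		else:
-- 			prev = P[-1]
-- 			row = [0, 1]
-- 			for cb in range(2, cols):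
-- 				row.append(cb * prev[cb] + row[-1])
-- 		P.append(row)
-- 	return P
-- ===== Notes on version B (the rewrite author's own statement) =====
-- stated objective: faster
-- what changed: A fills each cell with an inner convolution sum over all previous rows (pow(cur_b,j) weighted, three nested loops); B builds the table row by row using the equivalent first-order recurrence P(ca,cb) = cb*P(ca-1,cb) + P(ca,cb-1), removing the inner j-loop entirely; intended as faster (the probe measured A 866ms / B 10ms at n=64; at the largest sizes both time out since the output table itself is huge).
import Mathlib
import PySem

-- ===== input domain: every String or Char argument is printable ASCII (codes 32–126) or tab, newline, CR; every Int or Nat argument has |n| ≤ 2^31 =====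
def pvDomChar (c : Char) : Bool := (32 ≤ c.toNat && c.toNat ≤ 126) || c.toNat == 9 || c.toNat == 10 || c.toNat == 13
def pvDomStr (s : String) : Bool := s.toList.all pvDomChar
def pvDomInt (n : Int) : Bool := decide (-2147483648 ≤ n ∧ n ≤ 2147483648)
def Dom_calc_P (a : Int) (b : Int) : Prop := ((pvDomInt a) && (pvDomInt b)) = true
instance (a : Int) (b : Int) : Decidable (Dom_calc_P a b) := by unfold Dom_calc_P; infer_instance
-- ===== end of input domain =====

-- B replaces A's inner convolution sum by the equivalent first-order recurrence
-- P(ca,cb) = cb*P(ca-1,cb) + P(ca,cb-1), filling the table row by row: one term per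
-- cell instead of a sum over all previous rows (intended as faster, O(a*b) cells vs
-- O(a^2*b) terms; a timing run measured A 866ms / B 10ms at n=64, and both time
-- out alike on inputs whose output table itself is astronomically large).

-- ===== PORT A =====
-- 'P[i][j]' read and write (Python list indexing; every index reached under Pre_
-- is a nonnegative in-range int, where pyGetD/pySetD are exact)
def tget (P : List (List Int)) (i j : Int) : Int :=
  PySem.List.pyGetD (PySem.List.pyGetD P i []) j 0

def tset (P : List (List Int)) (i j : Int) (v : Int) : List (List Int) :=
  PySem.List.pySetD P i (PySem.List.pySetD (PySem.List.pyGetD P i []) j v)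

def calc_P (a : Int) (b : Int) : List (List Int) :=
  let a := a + 1
  let b := b + 1
  let P : List (List Int) := List.replicate (a+1).toNat (List.replicate (b+1).toNat 0)
  let P := (PySem.List.pyRange 0 (b+1) 1).foldl (fun P cb => tset P 0 cb 1) P
  let P := (PySem.List.pyRange 0 (a+1) 1).foldl (fun P ca => tset P ca 1 1) P
  -- pow(cur_b, j): j comes from range(0, cur_a+1) so j ≥ 0, where 'cb ^ j.toNat' is exact
  (PySem.List.pyRange 2 (b+1) 1).foldl (fun P cb =>
    (PySem.List.pyRange 1 (a+1) 1).foldl (fun P ca =>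
      (PySem.List.pyRange 0 (ca+1) 1).foldl (fun P j =>
        tset P ca cb (tget P ca cb + cb ^ j.toNat * tget P (ca - j) (cb - 1))) P) P) P

-- ===== PORT B =====
def calc_P_alt (a : Int) (b : Int) : List (List Int) :=
  let cols := b + 2
  (PySem.List.pyRange 0 (a+2) 1).foldl (fun P ca =>
    let row :=
      if ca = 0 then List.replicate cols.toNat 1
      else
        let prev := PySem.List.pyGetD P (-1) []    -- P[-1]
        (PySem.List.pyRange 2 cols 1).foldl
          (fun row cb =>
            row ++ [cb * PySem.List.pyGetD prev cb 0 + PySem.List.pyGetD row (-1) 0]) [0, 1]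
    P ++ [row]) []

-- ===== PRECONDITION & SPEC =====
-- Pre_ is exactly the set of inputs on which A returns normally: on all other
-- inputs (b < 0 with a ≥ -1, or a ≤ -2 with b ≥ -1) A raises IndexError.
def Pre_calc_P (a : Int) (b : Int) : Prop := (-1 ≤ a ∧ 0 ≤ b) ∨ (a ≤ -2 ∧ b ≤ -2)
instance (a : Int) (b : Int) : Decidable (Pre_calc_P a b) := by unfold Pre_calc_P; infer_instance

def pvWitness_calc_P : Int × Int := (2, 2)

def Spec_calc_P (a : Int) (b : Int) (out : List (List Int)) : Prop := out = calc_P_alt a b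
instance (a : Int) (b : Int) (out : List (List Int)) : Decidable (Spec_calc_P a b out) := by
  unfold Spec_calc_P; infer_instance

-- ===== CLAIM (what is proved, stated in full; the proofs are below) =====
def Claim_equal_calc_P : Prop :=
  ∀ (a : Int) (b : Int), Dom_calc_P a b → Pre_calc_P a b → Spec_calc_P a b (calc_P a b)

-- ===== LEMMAS AND PROOFS =====

-- the common value: gP ca cb = P(ca, cb); gRow builds row ca from row ca-1
def gRow (prev : Nat → Int) : Nat → Int
  | 0 => 0
  | 1 => 1
  | cb+2 => ((cb:Int)+2) * prev (cb+2) + gRow prev (cb+1)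

def gP : Nat → Nat → Int
  | 0, _ => 1
  | ca+1, cb => gRow (gP ca) cb

-- partial convolution sum: gS m c t = Σ_{j<m} c^j · gP (t-j) (c-1)
def gS (m c t : Nat) : Int :=
  match m with
  | 0 => 0
  | m+1 => gS m c t + (c:Int)^m * gP (t-m) (c-1)

def mkTable (R C : Nat) (f : Nat → Nat → Int) : List (List Int) :=
  (List.range R).map (fun i => (List.range C).map (fun j => f i j))

def upd (f : Nat → Nat → Int) (i j : Nat) (v : Int) : Nat → Nat → Int :=
  fun x y => if x = i ∧ y = j then v else f x y

theorem gP_zero (y : Nat) : gP 0 y = 1 := rfl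

theorem gP_rec (k m : Nat) :
    gP (k+1) (m+2) = ((m:Int)+2) * gP k (m+2) + gP (k+1) (m+1) := rfl

theorem mkTable_congr {R C : Nat} {f g : Nat → Nat → Int}
    (h : ∀ x < R, ∀ y < C, f x y = g x y) : mkTable R C f = mkTable R C g := by
  unfold mkTable
  refine List.map_congr_left ?_
  intro x hx
  exact List.map_congr_left fun y hy =>
    h x (List.mem_range.mp hx) y (List.mem_range.mp hy)

theorem tget_mkTable {R C : Nat} (f : Nat → Nat → Int) {i j : Nat}
    (hi : i < R) (hj : j < C) : tget (mkTable R C f) (i : Int) (j : Int) = f i j := by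
  simp only [tget, mkTable, PySem.List.pyGetD_natCast]
  rw [PySem.List.getD_map_range _ _ _ _ hi, PySem.List.getD_map_range _ _ _ _ hj]

theorem tset_mkTable {R C : Nat} (f : Nat → Nat → Int) {i j : Nat} (v : Int)
    (hi : i < R) (hj : j < C) :
    tset (mkTable R C f) (i : Int) (j : Int) v = mkTable R C (upd f i j v) := by
  simp only [tset, PySem.List.pySetD_natCast, PySem.List.pyGetD_natCast]
  unfold mkTable
  rw [List.getD_eq_getElem _ _ (by simpa using hi)]
  apply List.ext_getElem
  · simp
  · intro x hx hx'
    simp only [List.getElem_set, List.getElem_map, List.getElem_range] at *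
    by_cases hxi : x = i
    · subst hxi
      apply List.ext_getElem
      · simp
      · intro y hy hy'
        simp only [List.getElem_map, List.getElem_range] at hy' ⊢
        by_cases hyj : y = j
        · subst hyj; simp [upd]
        · simp only [if_true]
          rw [List.getElem_set_ne (by omega)]
          simp [upd, hyj]
    · rw [if_neg (by omega)]
      apply List.map_congr_left
      intro y _
      simp [upd, hxi]

theorem foldl_range_inv {σ : Type} (f : σ → Nat → σ) (inv : Nat → σ) (n : Nat)
    (h : ∀ k < n, f (inv k) k = inv (k+1)) :
    (List.range n).foldl f (inv 0) = inv n := by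
  induction n with
  | zero => simp
  | succ n ih =>
    rw [List.range_succ, List.foldl_append]
    rw [ih (fun k hk => h k (Nat.lt_succ_of_lt hk))]
    simpa using h n (Nat.lt_succ_self n)

-- the convolution split: sum over row t+1 = head term + c · (sum over row t)
theorem gS_succ_shift (m c t : Nat) :
    gS (m+1) c (t+1) = gP (t+1) (c-1) + (c:Int) * gS m c t := by
  induction m with
  | zero => simp [gS]
  | succ m ih =>
    rw [show gS (m+1+1) c (t+1) = gS (m+1) c (t+1) + (c:Int)^(m+1) * gP (t+1-(m+1)) (c-1) from rfl]
    rw [ih]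
    rw [show gS (m+1) c t = gS m c t + (c:Int)^m * gP (t-m) (c-1) from rfl]
    rw [show t+1-(m+1) = t-m from by omega]
    ring

-- gP t c equals the full convolution sum A computes (c ≥ 2)
theorem gP_eq_gS (t c : Nat) (hc : 2 ≤ c) : gP t c = gS (t+1) c t := by
  obtain ⟨m, rfl⟩ : ∃ m, c = m + 2 := ⟨c - 2, by omega⟩
  induction t with
  | zero => simp [gS, gP_zero]
  | succ t ih =>
    rw [gS_succ_shift, gP_rec, ← ih]
    rw [show m + 2 - 1 = m + 1 from by omega]
    push_cast
    ring

-- table state after A's two initialisation loops and the column fill up to column c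
def Fst (c : Nat) : Nat → Nat → Int :=
  fun x y => if x = 0 ∨ y < c then gP x y else if y = 1 then 1 else 0

-- mid-column state: rows < t already filled at column c
def Gst (c t : Nat) : Nat → Nat → Int :=
  fun x y => if y = c then (if x < t then gP x c else if x = 0 then 1 else 0) else Fst c x y

theorem A_loop1 (R C : Nat) (hR : 1 ≤ R) :
    (List.range C).foldl (fun P (k : Nat) => tset P 0 (k : Int) 1)
      (mkTable R C (fun _ _ => 0)) =
    mkTable R C (fun x y => if x = 0 ∧ y < C then 1 else 0) := by
  have key := foldl_range_inv (fun P (k : Nat) => tset P 0 (k : Int) 1)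
    (fun k => mkTable R C (fun x y => if x = 0 ∧ y < k then 1 else 0)) C ?_
  · rw [show mkTable R C (fun x y => if x = 0 ∧ y < 0 then (1:Int) else 0)
        = mkTable R C (fun _ _ => 0) from mkTable_congr (by intro x _ y _; simp)] at key
    exact key
  · intro k hk
    show tset _ (((0:Nat) : Int)) ((k : Nat) : Int) 1 = _
    rw [tset_mkTable _ _ hR hk]
    apply mkTable_congr
    intro x _ y _
    simp only [upd]
    split_ifs <;> omega

theorem A_loop2 (R C : Nat) (hC : 2 ≤ C) :
    (List.range R).foldl (fun P (k : Nat) => tset P (k : Int) 1 1)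
      (mkTable R C (fun x y => if x = 0 ∧ y < C then 1 else 0)) =
    mkTable R C (Fst 2) := by
  have key := foldl_range_inv (fun P (k : Nat) => tset P (k : Int) 1 1)
    (fun k => mkTable R C (fun x y => if x = 0 ∧ y < C then 1
      else if y = 1 ∧ x < k then 1 else 0)) R ?_
  · rw [show mkTable R C (fun x y => if x = 0 ∧ y < C then (1:Int)
        else if y = 1 ∧ x < 0 then 1 else 0)
        = mkTable R C (fun x y => if x = 0 ∧ y < C then 1 else 0) from
          mkTable_congr (by intro x _ y _; split_ifs <;> omega)] at key
    rw [key]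
    apply mkTable_congr
    intro x hx y hy
    unfold Fst
    rcases Nat.eq_zero_or_pos x with h | h
    · subst h; simp [hy, gP_zero]
    · obtain ⟨x', rfl⟩ : ∃ x', x = x' + 1 := ⟨x - 1, by omega⟩
      by_cases hy1 : y = 1
      · subst hy1
        rw [if_neg (by omega), if_pos ⟨rfl, hx⟩, if_pos (by omega : x' + 1 = 0 ∨ 1 < 2)]
        rfl
      · by_cases hy2 : y < 2
        · have hy0 : y = 0 := by omega
          subst hy0
          rw [if_neg (by omega), if_neg (by omega), if_pos (by omega : x' + 1 = 0 ∨ 0 < 2)]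
          rfl
        · rw [if_neg (by omega), if_neg (by omega), if_neg (by omega), if_neg hy1]
  · intro k hk
    show tset _ ((k : Nat) : Int) (((1:Nat)) : Int) 1 = _
    rw [tset_mkTable _ _ hk (by omega)]
    apply mkTable_congr
    intro x _ y _
    simp only [upd]
    split_ifs <;> omega

-- inner loop (the j-convolution of A) at row t, column c
theorem A_inner (R C t c : Nat) (ht : 1 ≤ t) (htR : t < R) (hc : 2 ≤ c) (hcC : c < C) :
    (List.range (t+1)).foldl
      (fun P (m : Nat) => tset P (t : Int) (c : Int)
        (tget P (t : Int) (c : Int) +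
          (c : Int) ^ ((m : Int)).toNat * tget P ((t : Int) - (m : Int)) ((c : Int) - 1)))
      (mkTable R C (Gst c t)) =
    mkTable R C (Gst c (t+1)) := by
  have key := foldl_range_inv
    (fun P (m : Nat) => tset P (t : Int) (c : Int)
      (tget P (t : Int) (c : Int) +
        (c : Int) ^ ((m : Int)).toNat * tget P ((t : Int) - (m : Int)) ((c : Int) - 1)))
    (fun m => mkTable R C (fun x y => if x = t ∧ y = c then gS m c t else Gst c t x y))
    (t+1) ?_
  · rw [show mkTable R C (fun x y => if x = t ∧ y = c then gS 0 c t else Gst c t x y)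
        = mkTable R C (Gst c t) from mkTable_congr ?_] at key
    · rw [key]
      apply mkTable_congr
      intro x hx y hy
      by_cases hxy : x = t ∧ y = c
      · obtain ⟨rfl, rfl⟩ := hxy
        rw [if_pos ⟨rfl, rfl⟩, ← gP_eq_gS _ _ hc]
        unfold Gst
        rw [if_pos rfl, if_pos (Nat.lt_succ_self _)]
      · rw [if_neg hxy]
        unfold Gst
        by_cases hyc : y = c
        · subst hyc
          have hxt : ¬ x = t := fun h => hxy ⟨h, rfl⟩
          rw [if_pos rfl, if_pos rfl]
          split_ifs <;> first | rfl | omega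
        · rw [if_neg hyc, if_neg hyc]
    · intro x _ y _
      by_cases hxy : x = t ∧ y = c
      · obtain ⟨rfl, rfl⟩ := hxy
        rw [if_pos ⟨rfl, rfl⟩]
        unfold Gst
        rw [if_pos rfl, if_neg (by omega), if_neg (by omega)]
        rfl
      · rw [if_neg hxy]
  · intro m hm
    have hmt : m ≤ t := by omega
    have e1 : ((t : Int) - (m : Int)) = ((t - m : Nat) : Int) := by push_cast [hmt]; ring
    have e2 : ((c : Int) - 1) = ((c - 1 : Nat) : Int) := by push_cast [show 1 ≤ c by omega]; ring
    simp only [e1, e2]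
    rw [tget_mkTable _ htR hcC, tget_mkTable _ (by omega : t - m < R) (by omega : c - 1 < C)]
    rw [tset_mkTable _ _ htR hcC]
    have hread : (if t - m = t ∧ c - 1 = c then gS m c t else Gst c t (t - m) (c - 1))
        = gP (t - m) (c - 1) := by
      rw [if_neg (by omega)]
      unfold Gst Fst
      rw [if_neg (by omega), if_pos (by omega : t - m = 0 ∨ c - 1 < c)]
    rw [if_pos ⟨rfl, rfl⟩, hread]
    apply mkTable_congr
    intro x _ y _
    simp only [upd]
    by_cases hxy : x = t ∧ y = c
    · obtain ⟨rfl, rfl⟩ := hxy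
      rw [if_pos ⟨rfl, rfl⟩, if_pos ⟨rfl, rfl⟩]
      rfl
    · simp only [if_neg hxy]

-- middle loop of A: fill rows 1..R-1 of column c
theorem A_mid (R C c : Nat) (hc : 2 ≤ c) (hcC : c < C) :
    (PySem.List.pyRange 1 (R : Int) 1).foldl
      (fun P ca =>
        (PySem.List.pyRange 0 (ca + 1) 1).foldl
          (fun P j => tset P ca (c : Int)
            (tget P ca (c : Int) + (c : Int) ^ j.toNat * tget P (ca - j) ((c : Int) - 1))) P)
      (mkTable R C (Fst c)) =
    mkTable R C (Fst (c+1)) := by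
  rw [PySem.List.pyRange_one, List.foldl_map]
  rw [show (((R:Int)) - 1).toNat = R - 1 from by omega]
  rcases Nat.eq_zero_or_pos R with hR0 | hR1
  · subst hR0
    simp [mkTable]
  · have key := foldl_range_inv
      (fun P (k : Nat) =>
        (PySem.List.pyRange 0 ((1 + (k:Int)) + 1) 1).foldl
          (fun P j => tset P (1 + (k:Int)) (c : Int)
            (tget P (1 + (k:Int)) (c : Int) +
              (c : Int) ^ j.toNat * tget P ((1 + (k:Int)) - j) ((c : Int) - 1))) P)
      (fun k => mkTable R C (Gst c (min (k+1) R)))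
      (R - 1) ?_
    · simp only [Nat.min_eq_left (show 0 + 1 ≤ R from by omega),
        show R - 1 + 1 = R from by omega, Nat.min_self] at key
      rw [show mkTable R C (Gst c (0+1)) = mkTable R C (Fst c) from mkTable_congr ?_] at key
      · rw [key]
        apply mkTable_congr
        intro x hx y hy
        unfold Gst Fst
        by_cases hyc : y = c
        · subst hyc
          rw [if_pos rfl, if_pos hx, if_pos (by omega : x = 0 ∨ y < y + 1)]
        · rw [if_neg hyc]
          by_cases h1 : x = 0 ∨ y < c
          · rw [if_pos h1, if_pos (by omega : x = 0 ∨ y < c + 1)]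
          · rw [if_neg h1, if_neg (by omega : ¬ (x = 0 ∨ y < c + 1))]
      · intro x _ y _
        unfold Gst Fst
        by_cases hyc : y = c
        · subst hyc
          by_cases hx0 : x = 0
          · rw [if_pos rfl, if_pos (by omega : x < 0 + 1), if_pos (Or.inl hx0)]
          · rw [if_pos rfl, if_neg (by omega : ¬ x < 0 + 1), if_neg hx0,
              if_neg (by omega : ¬ (x = 0 ∨ y < y)), if_neg (by omega : ¬ y = 1)]
        · rw [if_neg hyc]
    · intro k hk
      have hkR : k + 1 < R := by omega
      beta_reduce
      rw [Nat.min_eq_left (by omega : k + 1 ≤ R), Nat.min_eq_left (by omega : k + 1 + 1 ≤ R)]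
      have e3 : (1 + (k : Int)) = (((k + 1 : Nat)) : Int) := by push_cast; ring
      simp only [e3]
      rw [show ((((k+1 : Nat)) : Int) + 1) = (((k + 2 : Nat)) : Int) from by push_cast; ring]
      rw [PySem.List.pyRange_zero_natCast, List.foldl_map]
      exact A_inner R C (k+1) c (by omega) hkR hc hcC

-- outer loop of A: fill columns 2..C-1
theorem A_outer (R C : Nat) (hC : 2 ≤ C) :
    (PySem.List.pyRange 2 (C : Int) 1).foldl
      (fun P cb =>
        (PySem.List.pyRange 1 (R : Int) 1).foldl
          (fun P ca =>
            (PySem.List.pyRange 0 (ca + 1) 1).foldl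
              (fun P j => tset P ca cb
                (tget P ca cb + cb ^ j.toNat * tget P (ca - j) (cb - 1))) P) P)
      (mkTable R C (Fst 2)) =
    mkTable R C (Fst C) := by
  rw [PySem.List.pyRange_one 2 (C : Int), List.foldl_map]
  rw [show (((C:Int)) - 2).toNat = C - 2 from by omega]
  have key := foldl_range_inv
    (fun P (m : Nat) =>
      (PySem.List.pyRange 1 (R : Int) 1).foldl
        (fun P ca =>
          (PySem.List.pyRange 0 (ca + 1) 1).foldl
            (fun P j => tset P ca (2 + (m:Int))
              (tget P ca (2 + (m:Int)) +
                (2 + (m:Int)) ^ j.toNat * tget P (ca - j) ((2 + (m:Int)) - 1))) P) P)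
    (fun m => mkTable R C (Fst (2 + m)))
    (C - 2) ?_
  · rw [show 2 + (C - 2) = C from by omega] at key
    rw [show 2 + 0 = 2 from rfl] at key
    exact key
  · intro m hm
    beta_reduce
    have e : (2 + (m : Int)) = (((2 + m : Nat)) : Int) := by push_cast; ring
    simp only [e]
    rw [show 2 + (m + 1) = (2 + m) + 1 from by omega]
    exact A_mid R C (2 + m) (by omega) (by omega)

theorem mkTable_zero_init (R C : Nat) :
    List.replicate R (List.replicate C (0 : Int)) = mkTable R C (fun _ _ => 0) := by
  unfold mkTable
  symm
  rw [List.eq_replicate_iff]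
  refine ⟨by simp, ?_⟩
  intro row hrow
  rw [List.mem_map] at hrow
  obtain ⟨i, -, rfl⟩ := hrow
  rw [List.eq_replicate_iff]
  refine ⟨by simp, ?_⟩
  intro v hv
  rw [List.mem_map] at hv
  obtain ⟨j, -, rfl⟩ := hv
  rfl

-- A computes the gP table (main case)
theorem calcP_main (a b : Int) (R C : Nat) (ha : a + 2 = (R : Int)) (hb : b + 2 = (C : Int))
    (hR : 1 ≤ R) (hC : 2 ≤ C) : calc_P a b = mkTable R C gP := by
  simp only [calc_P]
  rw [show a + 1 + 1 = (R : Int) from by omega, show b + 1 + 1 = (C : Int) from by omega]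
  rw [show ((R : Int)).toNat = R from by omega, show ((C : Int)).toNat = C from by omega]
  rw [mkTable_zero_init]
  rw [PySem.List.pyRange_zero_natCast C, List.foldl_map, A_loop1 R C hR]
  rw [PySem.List.pyRange_zero_natCast R, List.foldl_map, A_loop2 R C hC]
  rw [A_outer R C hC]
  apply mkTable_congr
  intro x _ y hy
  unfold Fst
  rw [if_pos (Or.inr hy)]

theorem map_range_gP_zero (C : Nat) : (List.range C).map (gP 0) = List.replicate C 1 := by
  rw [List.eq_replicate_iff]
  refine ⟨by simp, ?_⟩
  intro v hv
  rw [List.mem_map] at hv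
  obtain ⟨j, -, rfl⟩ := hv
  rfl

theorem mkTable_succ (k C : Nat) (f : Nat → Nat → Int) :
    mkTable (k+1) C f = mkTable k C f ++ [(List.range C).map (f k)] := by
  unfold mkTable
  rw [List.range_succ, List.map_append]
  rfl

-- B's inner loop: build row k+1 from row k
theorem B_row (C k : Nat) (hC : 2 ≤ C) :
    (PySem.List.pyRange 2 (C : Int) 1).foldl
      (fun row cb =>
        row ++ [cb * PySem.List.pyGetD ((List.range C).map (gP k)) cb 0
          + PySem.List.pyGetD row (-1) 0]) [0, 1]
    = (List.range C).map (gP (k+1)) := by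
  rw [PySem.List.pyRange_one 2 (C : Int), List.foldl_map]
  rw [show (((C:Int)) - 2).toNat = C - 2 from by omega]
  have key := foldl_range_inv
    (fun row (m : Nat) =>
      row ++ [(2 + (m:Int)) * PySem.List.pyGetD ((List.range C).map (gP k)) (2 + (m:Int)) 0
        + PySem.List.pyGetD row (-1) 0])
    (fun m => (List.range (min (2 + m) C)).map (gP (k+1)))
    (C - 2) ?_
  · rw [show min (2 + 0) C = 2 from by omega, show min (2 + (C-2)) C = C from by omega] at key
    rw [show (List.range 2).map (gP (k+1)) = [0, 1] from by
      simp [List.range_succ]; exact ⟨rfl, rfl⟩] at key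
    exact key
  · intro m hm
    beta_reduce
    rw [Nat.min_eq_left (by omega : 2 + m ≤ C), Nat.min_eq_left (by omega : 2 + (m + 1) ≤ C)]
    have e : (2 + (m:Int)) = (((2 + m : Nat)) : Int) := by push_cast; ring
    rw [e, PySem.List.pyGetD_natCast,
      PySem.List.getD_map_range _ _ _ _ (by omega : 2 + m < C)]
    rw [show 2 + m = (1 + m) + 1 from by omega, List.range_succ, List.map_append,
      List.map_singleton, PySem.List.pyGetD_neg_one_append_singleton]
    rw [show 2 + (m + 1) = ((1 + m) + 1) + 1 from by omega, List.range_succ (n := ((1 + m)) + 1),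
      List.map_append, List.map_singleton]
    congr 1
    · rw [List.range_succ, List.map_append, List.map_singleton]
    · have h1 : (1 + m) + 1 = m + 2 := by omega
      have h2 : 1 + m = m + 1 := by omega
      rw [h1, h2, gP_rec]
      push_cast
      ring_nf

-- B computes the gP table (main case)
theorem calcP_alt_main (a b : Int) (R C : Nat) (ha : a + 2 = (R : Int)) (hb : b + 2 = (C : Int))
    (hC : 2 ≤ C) : calc_P_alt a b = mkTable R C gP := by
  simp only [calc_P_alt]
  rw [ha, hb, show ((C : Int)).toNat = C from by omega]
  rw [PySem.List.pyRange_zero_natCast R, List.foldl_map]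
  have key := foldl_range_inv
    (fun P (k : Nat) =>
      P ++ [if ((k : Nat) : Int) = 0 then List.replicate C 1
        else (PySem.List.pyRange 2 (C : Int) 1).foldl
          (fun row cb =>
            row ++ [cb * PySem.List.pyGetD (PySem.List.pyGetD P (-1) []) cb 0
              + PySem.List.pyGetD row (-1) 0]) [0, 1]])
    (fun k => mkTable k C gP)
    R ?_
  · exact key
  · intro k hk
    beta_reduce
    by_cases hk0 : k = 0
    · subst hk0
      rw [if_pos (show (((0:Nat)) : Int) = 0 from by norm_num), mkTable_succ, ← map_range_gP_zero]
    · rw [if_neg (by exact_mod_cast hk0)]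
      obtain ⟨k', rfl⟩ : ∃ k', k = k' + 1 := ⟨k - 1, by omega⟩
      rw [mkTable_succ k' C gP, PySem.List.pyGetD_neg_one_append_singleton]
      rw [B_row C k' hC]
      rw [← mkTable_succ, mkTable_succ (k'+1) C gP]

-- degenerate quadrant: zero-row table
theorem calcP_degenerate (a b : Int) (ha : a ≤ -2) (hb : b ≤ -2) : calc_P a b = [] := by
  simp only [calc_P]
  rw [show (a+1+1).toNat = 0 from by omega]
  rw [PySem.List.pyRange_one_eq_nil (by omega : b+1+1 ≤ 0),
    PySem.List.pyRange_one_eq_nil (by omega : a+1+1 ≤ 0),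
    PySem.List.pyRange_one_eq_nil (by omega : b+1+1 ≤ 2)]
  rfl

theorem calcP_alt_degenerate (a b : Int) (ha : a ≤ -2) : calc_P_alt a b = [] := by
  simp only [calc_P_alt]
  rw [PySem.List.pyRange_one_eq_nil (by omega : a+2 ≤ 0)]
  rfl

-- ===== VERDICT (by name: the statement is the Claim_ definition above) =====
theorem calc_P_spec : Claim_equal_calc_P := by
  intro a b _ hpre
  unfold Spec_calc_P
  rcases hpre with ⟨ha, hb⟩ | ⟨ha, hb⟩
  · rw [calcP_main a b (a+2).toNat (b+2).toNat (by omega) (by omega) (by omega) (by omega),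
      calcP_alt_main a b (a+2).toNat (b+2).toNat (by omega) (by omega) (by omega)]
  · rw [calcP_degenerate a b ha hb, calcP_alt_degenerate a b ha]
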